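-- pv_equiv track=rewrite | github.com/nDevised/Simple-Beartracks | simple-beartracks.py | getEnrolledCountDict
-- ===== SOURCE A (Python) =====
-- def getEnrolledCountDict(enrollment,courses):
--     """
--     Gets a dictionary of how many people are enrolled for each course
--     :param enrollment: Dictionary of the enrolled courses for every student [dict]
--     :param courses: Dictionary of all the courses and their times, capacity,
--     :return: Dictionary of the courses enrolled count
--     """
--
--     enrolledCountDict = {}
--
--     enrolledCourses = list(enrollment.values())
--
--
--     # Iterate the courses for each student and check how many students have taken that course
--     for course in courses:
--         enrolledCountDict[course] = 0
--         for courseList in enrolledCourses: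
--             if course in courseList:
--                 enrolledCountDict[course] = enrolledCountDict[course] + 1
--
--     return enrolledCountDict
-- ===== SOURCE B (Python) =====
-- def getEnrolledCountDict(enrollment, courses):
--     """Flatten the students' distinct enrolled courses into one list of hits,
--     then build the result dict by counting each course's hits."""
--     hits = [c for cl in enrollment.values() for c in set(cl)]
--     return {c: hits.count(c) for c in courses}
-- ===== Notes on version B (the rewrite author's own statement) =====
-- stated objective: alternative
-- what changed: Instead of A's nested loop that, for each course, rescans every student's list with a membership test while mutating counters in a dict, B first flattens every student's distinct courses into a single hit list and then builds the result by a dict comprehension counting each course's occurrences in that list.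
import Mathlib
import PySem

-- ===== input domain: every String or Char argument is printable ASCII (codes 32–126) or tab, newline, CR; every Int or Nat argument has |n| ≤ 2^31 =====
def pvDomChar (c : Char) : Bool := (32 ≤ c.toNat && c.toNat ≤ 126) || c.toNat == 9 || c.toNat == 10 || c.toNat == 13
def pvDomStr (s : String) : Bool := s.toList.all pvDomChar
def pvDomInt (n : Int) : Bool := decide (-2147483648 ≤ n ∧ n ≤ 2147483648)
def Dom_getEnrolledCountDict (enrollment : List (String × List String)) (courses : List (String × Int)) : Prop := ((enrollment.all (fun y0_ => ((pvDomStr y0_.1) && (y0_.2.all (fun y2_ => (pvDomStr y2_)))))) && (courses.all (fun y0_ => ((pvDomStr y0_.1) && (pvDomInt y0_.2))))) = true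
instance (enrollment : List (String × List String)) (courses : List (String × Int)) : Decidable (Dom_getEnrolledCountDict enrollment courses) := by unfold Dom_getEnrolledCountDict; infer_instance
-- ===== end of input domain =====

-- B replaces A's per-course rescans of the students by flattening each student's
-- distinct courses into one hit list and counting each course key in it (alternative decomposition, same cost class).


-- ===== PORT A =====
def getEnrolledCountDict (enrollment : List (String × List String)) (courses : List (String × Int)) : List (String × Int) :=
  -- enrolledCourses = list(enrollment.values())
  let enrolledCourses := (PySem.Dict.ofList enrollment).values
  -- for course in courses: dict[course] = 0; for courseList in enrolledCourses: if course in courseList: dict[course] += 1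
  let d := (PySem.Dict.ofList courses).keys.foldl
    (fun d course =>
      enrolledCourses.foldl
        (fun d courseList =>
          if courseList.contains course then d.insert course (d.getD course 0 + 1) else d)
        (d.insert course 0))
    PySem.Dict.empty
  d.items

-- ===== PORT B =====
def getEnrolledCountDict_alt (enrollment : List (String × List String)) (courses : List (String × Int)) : List (String × Int) :=
  -- hits = [c for cl in enrollment.values() for c in set(cl)]
  let hits := ((PySem.Dict.ofList enrollment).values).flatMap (fun cl => PySem.Set.ofList cl)
  -- {c: hits.count(c) for c in courses}: the comprehension inserts one FRESH key per (distinct)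
  -- key of `courses`, i.e. appends the pairs in key order — exactly this map.
  (PySem.Dict.ofList courses).keys.map (fun c => (c, (hits.count c : Int)))

-- ===== PRECONDITION & SPEC =====
def Spec_getEnrolledCountDict (enrollment : List (String × List String)) (courses : List (String × Int)) (out : List (String × Int)) : Prop := out = getEnrolledCountDict_alt enrollment courses
instance (enrollment : List (String × List String)) (courses : List (String × Int)) (out : List (String × Int)) : Decidable (Spec_getEnrolledCountDict enrollment courses out) := by unfold Spec_getEnrolledCountDict; infer_instance

-- ===== CLAIM =====
def Claim_equal_getEnrolledCountDict : Prop := ∀ (enrollment : List (String × List String)) (courses : List (String × Int)), Dom_getEnrolledCountDict enrollment courses → Spec_getEnrolledCountDict enrollment courses (getEnrolledCountDict enrollment courses)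

-- ===== LEMMAS AND PROOFS =====

-- A dict whose value at each key is a function of the key; every intermediate dict of A's loop has this shape.
def mkMap (s : List String) (g : String → Int) : PySem.Dict String Int :=
  PySem.Dict.mk (s.map (fun k => (k, g k)))

theorem mkMap_congr (s : List String) (g g' : String → Int)
    (h : ∀ k ∈ s, g k = g' k) : mkMap s g = mkMap s g' := by
  apply PySem.Dict.ext
  exact List.map_congr_left (fun k hk => by simp [h k hk])

theorem get?_mkMap (s : List String) (g : String → Int) (c : String) :
    (mkMap s g).get? c = if c ∈ s then some (g c) else none := by
  induction s with
  | nil => simp [mkMap, PySem.Dict.get?]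
  | cons a s ih =>
    simp only [mkMap, List.map_cons] at *
    rw [PySem.Dict.get?_mk_cons]
    by_cases hac : a = c
    · subst hac; simp
    · simp [Ne.symm hac, hac, ih]

theorem getD_mkMap (s : List String) (g : String → Int) (c : String) (hc : c ∈ s) :
    (mkMap s g).getD c 0 = g c := by
  rw [PySem.Dict.getD_eq_get?_getD, get?_mkMap]; simp [hc]

theorem contains_mkMap (s : List String) (g : String → Int) (c : String) :
    (mkMap s g).contains c = decide (c ∈ s) := by
  rw [PySem.Dict.contains_eq_isSome_get?, get?_mkMap]
  by_cases hc : c ∈ s <;> simp [hc]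

theorem insert_mkMap (s : List String) (g : String → Int) (c : String) (v : Int) :
    (mkMap s g).insert c v = mkMap (PySem.Set.add s c) (fun k => if k = c then v else g k) := by
  by_cases hc : c ∈ s
  · have hcont : (mkMap s g).contains c = true := by simp [contains_mkMap, hc]
    apply PySem.Dict.ext
    rw [PySem.Dict.items_insert_of_contains _ _ hcont]
    have hadd : PySem.Set.add s c = s := by
      show (if s.contains c then s else s ++ [c]) = s
      simp [hc]
    rw [hadd]
    show (s.map (fun k => (k, g k))).map _ = s.map _
    rw [List.map_map]
    refine List.map_congr_left (fun k _ => ?_)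
    by_cases hkc : k = c
    · subst hkc; simp
    · simp [hkc]
  · have hcont : (mkMap s g).contains c = false := by simp [contains_mkMap, hc]
    apply PySem.Dict.ext
    rw [PySem.Dict.items_insert_of_not_contains _ _ hcont]
    have hadd : PySem.Set.add s c = s ++ [c] := by
      show (if s.contains c then s else s ++ [c]) = s ++ [c]
      simp [hc]
    rw [hadd]
    show (s.map (fun k => (k, g k))) ++ [(c, v)] = ((s ++ [c]).map _)
    rw [List.map_append]
    congr 1
    · refine (List.map_congr_left (fun k hk => ?_)).symm
      have : k ≠ c := fun h => hc (h ▸ hk)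
      simp [this]
    · simp

-- A's inner loop: bump only `c` (which is a key of the dict), once per enrolled student.
theorem innerA (V : List (List String)) (s : List String) (g : String → Int)
    (c : String) (hc : c ∈ s) :
    V.foldl (fun d cl => if cl.contains c then d.insert c (d.getD c 0 + 1) else d) (mkMap s g)
      = mkMap s (fun k => if k = c then g c + (V.countP (fun cl => cl.contains c) : Int) else g k) := by
  induction V generalizing g with
  | nil =>
    simp only [List.foldl_nil, List.countP_nil]
    exact (mkMap_congr _ _ _ (fun k _ => by by_cases hkc : k = c <;> simp [hkc])).symm
  | cons cl V ih =>
    simp only [List.foldl_cons]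
    by_cases h : cl.contains c = true
    · rw [if_pos h, getD_mkMap s g c hc, insert_mkMap]
      have hadd : PySem.Set.add s c = s := by
        show (if s.contains c then s else s ++ [c]) = s
        simp [hc]
      rw [hadd, ih (fun k => if k = c then g c + 1 else g k)]
      refine mkMap_congr _ _ _ (fun k _ => ?_)
      by_cases hkc : k = c
      · subst hkc
        simp only [List.countP_cons, h, if_pos]
        push_cast
        ring
      · simp [hkc]
    · have h' : c ∉ cl := by simpa using h
      rw [if_neg (by simpa using h'), ih g]
      refine mkMap_congr _ _ _ (fun k _ => ?_)
      by_cases hkc : k = c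
      · subst hkc
        simp [h']
      · simp [hkc]

theorem mem_add_self (s : List String) (c : String) : c ∈ PySem.Set.add s c := by
  show c ∈ (if s.contains c then s else s ++ [c])
  by_cases hc : c ∈ s <;> simp [hc]

-- A's whole loop: every key of K ends at its membership count, in first-insertion key order.
theorem outerA (K : List String) (V : List (List String)) (s : List String) (g : String → Int) :
    K.foldl
      (fun d course =>
        V.foldl (fun d cl => if cl.contains course then d.insert course (d.getD course 0 + 1) else d)
          (d.insert course 0))
      (mkMap s g)
      = mkMap (PySem.Set.update s K)
          (fun k => if k ∈ K then (V.countP (fun cl => cl.contains k) : Int) else g k) := by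
  induction K generalizing s g with
  | nil =>
    simp only [List.foldl_nil]
    exact (mkMap_congr _ _ _ (fun k _ => by simp)).symm
  | cons c K ih =>
    simp only [List.foldl_cons]
    rw [insert_mkMap, innerA V _ _ c (mem_add_self s c), ih]
    have hupd : PySem.Set.update s (c :: K) = PySem.Set.update (PySem.Set.add s c) K := rfl
    rw [← hupd]
    refine mkMap_congr _ _ _ (fun k _ => ?_)
    by_cases hk : k ∈ K
    · simp [hk]
    · by_cases hkc : k = c
      · subst hkc; simp [hk]
      · simp [hk, hkc]

theorem empty_eq_mkMap : (PySem.Dict.empty : PySem.Dict String Int) = mkMap [] (fun _ => 0) := rfl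

-- B's flattened hit list counts exactly A's membership count.
theorem count_flat (V : List (List String)) (k : String) :
    (V.flatMap (fun cl => PySem.Set.ofList cl)).count k
      = V.countP (fun cl => cl.contains k) := by
  induction V with
  | nil => simp
  | cons cl V ih =>
    simp only [List.flatMap_cons, List.count_append, List.countP_cons, ih]
    by_cases h : cl.contains k = true
    · have hmem : k ∈ PySem.Set.ofList cl := (PySem.Set.mem_ofList cl k).mpr (by simpa using h)
      have hkcl : k ∈ cl := by simpa using h
      rw [List.count_eq_one_of_mem (PySem.Set.nodup_ofList cl) hmem]
      simp [hkcl, Nat.add_comm]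
    · have h' : k ∉ cl := by simpa using h
      have hmem : k ∉ PySem.Set.ofList cl := fun hm => h' ((PySem.Set.mem_ofList cl k).mp hm)
      rw [List.count_eq_zero_of_not_mem hmem]
      simp [h']

-- ===== VERDICT =====
theorem getEnrolledCountDict_spec : Claim_equal_getEnrolledCountDict := by
  unfold Claim_equal_getEnrolledCountDict
  intro enrollment courses _
  unfold Spec_getEnrolledCountDict getEnrolledCountDict getEnrolledCountDict_alt
  simp only []
  rw [empty_eq_mkMap, outerA]
  show (mkMap _ _).items = _
  have hupd : PySem.Set.update ([] : List String) (PySem.Dict.ofList courses).keys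
      = PySem.Set.ofList (PySem.Dict.ofList courses).keys := (PySem.Set.ofList_eq_foldl _).symm
  rw [hupd]
  show (PySem.Set.ofList (PySem.Dict.ofList courses).keys).map _ = _
  have hsub : ∀ k, k ∈ PySem.Set.ofList (PySem.Dict.ofList courses).keys →
      k ∈ (PySem.Dict.ofList courses).keys := fun k hk => (PySem.Set.mem_ofList _ k).mp hk
  have hset : PySem.Set.ofList (PySem.Dict.ofList courses).keys = (PySem.Dict.ofList courses).keys :=
    PySem.Set.ofList_eq_self_of_nodup _ (PySem.Dict.nodup_keys_ofList courses)
  rw [hset]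
  refine List.map_congr_left (fun k hk => ?_)
  simp only [hk, if_pos, count_flat]
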